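-- pv_equiv track=rewrite | github.com/RaulAdSe/garmin_trainer | training-analyzer/src/services/comparison_service.py | _are_similar_types
-- ===== SOURCE A (Python) =====
-- def _are_similar_types(type1: str, type2: str) -> bool:
--     """Check if two activity types are similar."""
--     similar_groups = [
--         {"running", "trail_running", "treadmill_running", "track_running"},
--         {"cycling", "road_biking", "mountain_biking", "indoor_cycling"},
--         {"swimming", "pool_swimming", "open_water_swimming"},
--         {"walking", "hiking"},
--     ]
--
--     type1_lower = (type1 or "").lower()
--     type2_lower = (type2 or "").lower()
--
--     for group in similar_groups:
--         if type1_lower in group and type2_lower in group: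
--             return True
--
--     return False
-- ===== SOURCE B (Python) =====
-- _SIMILAR_GROUPS = [
--     ["running", "trail_running", "treadmill_running", "track_running"],
--     ["cycling", "road_biking", "mountain_biking", "indoor_cycling"],
--     ["swimming", "pool_swimming", "open_water_swimming"],
--     ["walking", "hiking"],
-- ]
-- _GROUP_OF = {t: i for i, g in enumerate(_SIMILAR_GROUPS) for t in g}
--
--
-- def _are_similar_types(type1: str, type2: str) -> bool:
--     g1 = _GROUP_OF.get((type1 or "").lower())
--     g2 = _GROUP_OF.get((type2 or "").lower())
--     return g1 is not None and g1 == g2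
-- ===== Notes on version B (the rewrite author's own statement) =====
-- stated objective: idiomatic
-- what changed: Replaces the per-call scan over a list of sets with a module-level reverse dict mapping each type string to its group index, so the function is two O(1) lookups and an equality test.
import Mathlib
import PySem

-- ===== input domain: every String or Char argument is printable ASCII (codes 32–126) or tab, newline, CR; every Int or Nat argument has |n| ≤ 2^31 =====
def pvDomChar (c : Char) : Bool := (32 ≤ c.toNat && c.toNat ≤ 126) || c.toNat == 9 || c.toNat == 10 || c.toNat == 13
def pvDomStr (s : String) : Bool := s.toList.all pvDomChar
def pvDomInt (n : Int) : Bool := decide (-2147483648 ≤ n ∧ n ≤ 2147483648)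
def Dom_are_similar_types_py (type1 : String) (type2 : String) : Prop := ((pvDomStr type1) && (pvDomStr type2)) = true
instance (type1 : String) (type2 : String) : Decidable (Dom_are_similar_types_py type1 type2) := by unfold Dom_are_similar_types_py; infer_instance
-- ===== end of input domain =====

-- B replaces A's per-call scan over a list of sets by a precomputed reverse dict (type → group index)
-- and two lookups; equivalence of the return values is proved on all inputs (both are total).

-- ===== PORT A =====
-- the list of similar groups, as Python sets of strings
def pvSimilarGroups : List (PySem.Set String) :=
  [ PySem.Set.ofList ["running", "trail_running", "treadmill_running", "track_running"],
    PySem.Set.ofList ["cycling", "road_biking", "mountain_biking", "indoor_cycling"],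
    PySem.Set.ofList ["swimming", "pool_swimming", "open_water_swimming"],
    PySem.Set.ofList ["walking", "hiking"] ]

-- the 'for group in similar_groups: if … return True' loop, with early return
def pvLoopA (t1 : String) (t2 : String) : List (PySem.Set String) → Bool
  | [] => false
  | g :: rest =>
      if PySem.Set.contains g t1 && PySem.Set.contains g t2 then true
      else pvLoopA t1 t2 rest

def are_similar_types_py (type1 : String) (type2 : String) : Bool :=
  -- (type1 or "").lower(): empty string is falsy
  let type1_lower := PySem.Str.lower (if type1 == "" then "" else type1)
  let type2_lower := PySem.Str.lower (if type2 == "" then "" else type2)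
  pvLoopA type1_lower type2_lower pvSimilarGroups

-- ===== PORT B =====
def pvSimilarGroupsB : List (List String) :=
  [ ["running", "trail_running", "treadmill_running", "track_running"],
    ["cycling", "road_biking", "mountain_biking", "indoor_cycling"],
    ["swimming", "pool_swimming", "open_water_swimming"],
    ["walking", "hiking"] ]

-- _GROUP_OF = {t: i for i, g in enumerate(_SIMILAR_GROUPS) for t in g}
def pvGroupOf : PySem.Dict String Int :=
  (PySem.List.enumerate pvSimilarGroupsB).foldl
    (fun d ig => ig.2.foldl (fun d t => d.insert t ig.1) d) PySem.Dict.empty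

def are_similar_types_py_alt (type1 : String) (type2 : String) : Bool :=
  let g1 := pvGroupOf.get? (PySem.Str.lower (if type1 == "" then "" else type1))
  let g2 := pvGroupOf.get? (PySem.Str.lower (if type2 == "" then "" else type2))
  g1.isSome && g1 == g2

-- ===== PRECONDITION & SPEC =====
def Spec_are_similar_types_py (type1 : String) (type2 : String) (out : Bool) : Prop := out = are_similar_types_py_alt type1 type2
instance (type1 : String) (type2 : String) (out : Bool) : Decidable (Spec_are_similar_types_py type1 type2 out) := by unfold Spec_are_similar_types_py; infer_instance

-- ===== CLAIM (what is proved, stated in full; the proofs are below) =====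
def Claim_equal_are_similar_types_py : Prop := ∀ (type1 : String) (type2 : String), Dom_are_similar_types_py type1 type2 → Spec_are_similar_types_py type1 type2 (are_similar_types_py type1 type2)

-- ===== LEMMAS AND PROOFS =====

-- all 13 activity-type strings, in the dict's insertion order
def pvAllTypes : List String :=
  ["running", "trail_running", "treadmill_running", "track_running",
   "cycling", "road_biking", "mountain_biking", "indoor_cycling",
   "swimming", "pool_swimming", "open_water_swimming", "walking", "hiking"]

-- a string outside the 13 known types is not a key of the reverse dict
lemma pv_get?_none (l : String) (h : l ∉ pvAllTypes) : pvGroupOf.get? l = none := by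
  have e : pvGroupOf = PySem.Dict.mk [("running",0),("trail_running",0),("treadmill_running",0),("track_running",0),("cycling",1),("road_biking",1),("mountain_biking",1),("indoor_cycling",1),("swimming",2),("pool_swimming",2),("open_water_swimming",2),("walking",3),("hiking",3)] := by decide
  simp only [pvAllTypes, List.mem_cons, not_or, List.not_mem_nil] at h
  obtain ⟨h1,h2,h3,h4,h5,h6,h7,h8,h9,h10,h11,h12,h13,-⟩ := h
  simp [e, Ne.symm h1, Ne.symm h2, Ne.symm h3, Ne.symm h4, Ne.symm h5,
    Ne.symm h6, Ne.symm h7, Ne.symm h8, Ne.symm h9, Ne.symm h10, Ne.symm h11, Ne.symm h12,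
    Ne.symm h13, PySem.Dict.get?]

-- a string outside the 13 known types lies in none of A's groups
lemma pv_contains_false (l : String) (h : l ∉ pvAllTypes) :
    ∀ g ∈ pvSimilarGroups, PySem.Set.contains g l = false := by
  simp only [pvAllTypes, List.mem_cons, not_or, List.not_mem_nil] at h
  obtain ⟨h1,h2,h3,h4,h5,h6,h7,h8,h9,h10,h11,h12,h13,-⟩ := h
  intro g hg
  fin_cases hg <;>
    simp [PySem.Set.contains, PySem.Set.ofList, List.contains_eq_mem,
      h1,h2,h3,h4,h5,h6,h7,h8,h9,h10,h11,h12,h13]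

lemma pv_loop_false_right (l1 l2 : String) (h : ∀ g ∈ pvSimilarGroups, PySem.Set.contains g l2 = false) :
    pvLoopA l1 l2 pvSimilarGroups = false := by
  have e1 := h _ (show PySem.Set.ofList ["running", "trail_running", "treadmill_running", "track_running"] ∈ pvSimilarGroups from by simp [pvSimilarGroups])
  have e2 := h _ (show PySem.Set.ofList ["cycling", "road_biking", "mountain_biking", "indoor_cycling"] ∈ pvSimilarGroups from by simp [pvSimilarGroups])
  have e3 := h _ (show PySem.Set.ofList ["swimming", "pool_swimming", "open_water_swimming"] ∈ pvSimilarGroups from by simp [pvSimilarGroups])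
  have e4 := h _ (show PySem.Set.ofList ["walking", "hiking"] ∈ pvSimilarGroups from by simp [pvSimilarGroups])
  simp only [pvLoopA, pvSimilarGroups, e1, e2, e3, e4, Bool.and_false, Bool.false_eq_true, if_false]

lemma pv_loop_false_left (l1 l2 : String) (h : ∀ g ∈ pvSimilarGroups, PySem.Set.contains g l1 = false) :
    pvLoopA l1 l2 pvSimilarGroups = false := by
  have e1 := h _ (show PySem.Set.ofList ["running", "trail_running", "treadmill_running", "track_running"] ∈ pvSimilarGroups from by simp [pvSimilarGroups])
  have e2 := h _ (show PySem.Set.ofList ["cycling", "road_biking", "mountain_biking", "indoor_cycling"] ∈ pvSimilarGroups from by simp [pvSimilarGroups])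
  have e3 := h _ (show PySem.Set.ofList ["swimming", "pool_swimming", "open_water_swimming"] ∈ pvSimilarGroups from by simp [pvSimilarGroups])
  have e4 := h _ (show PySem.Set.ofList ["walking", "hiking"] ∈ pvSimilarGroups from by simp [pvSimilarGroups])
  simp only [pvLoopA, pvSimilarGroups, e1, e2, e3, e4, Bool.false_and, Bool.false_eq_true, if_false]

-- core fact: for arbitrary (already-lowered) strings the two computations agree
lemma pv_core (l1 l2 : String) :
    pvLoopA l1 l2 pvSimilarGroups =
      ((pvGroupOf.get? l1).isSome && pvGroupOf.get? l1 == pvGroupOf.get? l2) := by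
  by_cases h1 : l1 ∈ pvAllTypes
  · by_cases h2 : l2 ∈ pvAllTypes
    · fin_cases h1 <;> fin_cases h2 <;> decide
    · rw [pv_loop_false_right _ _ (pv_contains_false l2 h2), pv_get?_none l2 h2]
      cases hg : pvGroupOf.get? l1 <;> simp
  · rw [pv_loop_false_left _ _ (pv_contains_false l1 h1), pv_get?_none l1 h1]
    simp

-- ===== VERDICT (by name: the statement is the Claim_ definition above) =====
theorem are_similar_types_py_spec : Claim_equal_are_similar_types_py := by
  intro type1 type2 _
  unfold Spec_are_similar_types_py are_similar_types_py are_similar_types_py_alt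
  exact pv_core _ _
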